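-- pv_equiv track=rewrite | github.com/ishaanbuildsthings/leetcode | problems/Arrays and Hashing/985: Sum of Even Numbers After Queries.py | sumEvenAfterQueries
-- ===== SOURCE A (Python) =====
-- from typing import List
--
-- def sumEvenAfterQueries(nums: List[int], queries: List[List[int]]) -> List[int]:
--     evenSum = 0
--     for num in nums:
--         if num % 2 == 0:
--             evenSum += num
--     res = []
--     for val, index in queries:
--         oldValWasEven = nums[index] % 2 == 0
--         oldVal = nums[index]
--         nums[index] += val
--         if oldValWasEven:
--             evenSum -= oldVal
--         if nums[index] % 2 == 0:
--             evenSum += nums[index]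
--         res.append(evenSum)
--
--     return res
-- ===== SOURCE B (Python) =====
-- from typing import List
--
-- def sumEvenAfterQueries(nums: List[int], queries: List[List[int]]) -> List[int]:
--     res = []
--     for val, index in queries:
--         nums[index] += val
--         res.append(sum(num for num in nums if num % 2 == 0))
--     return res
-- ===== Notes on version B (the rewrite author's own statement) =====
-- stated objective: simpler
-- what changed: B drops A's incremental even-sum bookkeeping (subtract old value if even, add new value if even) and instead recomputes the even sum by a full scan of the mutated list after each query.
import Mathlib
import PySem

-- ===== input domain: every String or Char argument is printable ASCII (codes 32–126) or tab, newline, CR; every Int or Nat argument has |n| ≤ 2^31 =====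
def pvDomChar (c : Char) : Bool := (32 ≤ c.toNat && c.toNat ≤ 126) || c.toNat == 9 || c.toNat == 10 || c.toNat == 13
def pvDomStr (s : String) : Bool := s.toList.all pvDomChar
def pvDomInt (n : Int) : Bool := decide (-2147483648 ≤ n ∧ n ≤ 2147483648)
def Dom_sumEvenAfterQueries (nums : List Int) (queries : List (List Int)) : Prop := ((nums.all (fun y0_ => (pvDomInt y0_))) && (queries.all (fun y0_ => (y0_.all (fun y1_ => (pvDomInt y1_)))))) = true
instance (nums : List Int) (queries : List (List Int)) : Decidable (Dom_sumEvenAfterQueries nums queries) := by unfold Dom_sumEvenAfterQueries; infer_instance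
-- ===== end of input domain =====

-- B recomputes the even sum by a full scan after each query instead of A's incremental
-- bookkeeping (objective: simpler). Both Pythons mutate `nums` in place identically;
-- the equivalence proved here is about the RETURN value.

-- ===== PORT A =====
-- A: initial even-sum pass, then per query update evenSum incrementally.
def sumEvenAfterQueries (nums : List Int) (queries : List (List Int)) : List Int :=
  let evenSum := nums.foldl (fun s num => if PySem.Int.mod num 2 = 0 then s + num else s) 0
  (queries.foldl (fun (st : List Int × Int × List Int) q =>
      let ns := st.1
      let val := q.getD 0 0
      let index := q.getD 1 0
      let oldValWasEven := PySem.Int.mod (PySem.List.pyGetD ns index 0) 2 = 0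
      let oldVal := PySem.List.pyGetD ns index 0
      let ns' := PySem.List.pySetD ns index (oldVal + val)
      let es1 := if oldValWasEven then st.2.1 - oldVal else st.2.1
      let newVal := PySem.List.pyGetD ns' index 0
      let es2 := if PySem.Int.mod newVal 2 = 0 then es1 + newVal else es1
      (ns', es2, st.2.2 ++ [es2])) (nums, evenSum, [])).2.2

-- ===== PORT B =====
-- B: mutate, then re-scan the whole current list for the even sum.
def sumEvenAfterQueries_alt (nums : List Int) (queries : List (List Int)) : List Int :=
  (queries.foldl (fun (st : List Int × List Int) q =>
      let val := q.getD 0 0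
      let index := q.getD 1 0
      let ns' := PySem.List.pySetD st.1 index (PySem.List.pyGetD st.1 index 0 + val)
      (ns', st.2 ++ [((ns'.filter (fun num => PySem.Int.mod num 2 = 0)).sum)])) (nums, [])).2

-- ===== PRECONDITION & SPEC =====
-- Pre_ excludes exactly the inputs on which A raises: a query that is not a
-- [val, index] pair (ValueError on unpacking) or whose index is out of range
-- (IndexError); A returns on every other input.
def Pre_sumEvenAfterQueries (nums : List Int) (queries : List (List Int)) : Prop :=
  ∀ q ∈ queries, q.length = 2 ∧ PySem.Raise.InRange nums.length (q.getD 1 0)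
instance (nums : List Int) (queries : List (List Int)) : Decidable (Pre_sumEvenAfterQueries nums queries) := by unfold Pre_sumEvenAfterQueries; infer_instance

def pvWitness_sumEvenAfterQueries : List Int × List (List Int) := ([1, 2, 3], [[4, 0], [-3, 2], [2, -1]])

def Spec_sumEvenAfterQueries (nums : List Int) (queries : List (List Int)) (out : List Int) : Prop := out = sumEvenAfterQueries_alt nums queries
instance (nums : List Int) (queries : List (List Int)) (out : List Int) : Decidable (Spec_sumEvenAfterQueries nums queries out) := by unfold Spec_sumEvenAfterQueries; infer_instance

-- ===== CLAIM (what is proved, stated in full; the proofs are below) =====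
def Claim_equal_sumEvenAfterQueries : Prop := ∀ (nums : List Int) (queries : List (List Int)), Dom_sumEvenAfterQueries nums queries → Pre_sumEvenAfterQueries nums queries → Spec_sumEvenAfterQueries nums queries (sumEvenAfterQueries nums queries)

-- ===== LEMMAS AND PROOFS =====

-- the even sum B computes by scanning
def pvEvenSum (ns : List Int) : Int := (ns.filter (fun num => PySem.Int.mod num 2 = 0)).sum

lemma pvEvenSum_cons (x : Int) (xs : List Int) :
    pvEvenSum (x :: xs) = (if PySem.Int.mod x 2 = 0 then x else 0) + pvEvenSum xs := by
  by_cases h : PySem.Int.mod x 2 = 0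
  · have h2 : (2:Int) ∣ x := by rwa [← PySem.Int.mod_eq_zero_iff_dvd]
    simp [pvEvenSum, h2]
  · have h2 : ¬ (2:Int) ∣ x := by rwa [← PySem.Int.mod_eq_zero_iff_dvd]
    simp [pvEvenSum, h2]

lemma pvEvenSum_foldl (ns : List Int) : ∀ s : Int,
    ns.foldl (fun s num => if PySem.Int.mod num 2 = 0 then s + num else s) s = s + pvEvenSum ns := by
  induction ns with
  | nil => intro s; simp [pvEvenSum]
  | cons x xs ih =>
    intro s
    rw [List.foldl_cons, ih, pvEvenSum_cons]
    split_ifs <;> ring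

lemma pvIdx_norm (n : Nat) (i : Int) (h : PySem.Raise.InRange n i) :
    ∃ j : Nat, PySem.List.pyIdx? n i = some j ∧ j < n := by
  obtain ⟨h1, h2⟩ := h
  by_cases h0 : 0 ≤ i
  · exact ⟨i.toNat, by simp [PySem.List.pyIdx?, h0, h2], by omega⟩
  · exact ⟨n - (-i).toNat, by simp [PySem.List.pyIdx?, h0, h1], by omega⟩

lemma pvEvenSum_set (ns : List Int) : ∀ (j : Nat), j < ns.length → ∀ v : Int,
    pvEvenSum (ns.set j v) =
      pvEvenSum ns - (if PySem.Int.mod (ns.getD j 0) 2 = 0 then ns.getD j 0 else 0)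
        + (if PySem.Int.mod v 2 = 0 then v else 0) := by
  induction ns with
  | nil => intro j hj; simp at hj
  | cons x xs ih =>
    intro j hj v
    cases j with
    | zero => simp only [List.set, List.getD_cons_zero, pvEvenSum_cons]; ring
    | succ k =>
      have hk : k < xs.length := by simpa using hj
      simp only [List.set, List.getD_cons_succ, pvEvenSum_cons, ih k hk v]; ring

-- one query step, normalized to a Nat index: A's incremental update of the even sum
-- equals B's rescan of the mutated list
lemma pvStep (ns : List Int) (i v : Int) (h : PySem.Raise.InRange ns.length i) :
    (if PySem.Int.mod (PySem.List.pyGetD (PySem.List.pySetD ns i (PySem.List.pyGetD ns i 0 + v)) i 0) 2 = 0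
        then (if PySem.Int.mod (PySem.List.pyGetD ns i 0) 2 = 0 then pvEvenSum ns - PySem.List.pyGetD ns i 0 else pvEvenSum ns)
             + PySem.List.pyGetD (PySem.List.pySetD ns i (PySem.List.pyGetD ns i 0 + v)) i 0
        else (if PySem.Int.mod (PySem.List.pyGetD ns i 0) 2 = 0 then pvEvenSum ns - PySem.List.pyGetD ns i 0 else pvEvenSum ns))
    = pvEvenSum (PySem.List.pySetD ns i (PySem.List.pyGetD ns i 0 + v)) := by
  obtain ⟨j, hj, hjn⟩ := pvIdx_norm ns.length i h
  have hget : PySem.List.pyGetD ns i 0 = ns.getD j 0 := by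
    simp [PySem.List.pyGetD, PySem.List.pyGet?, hj, List.getD]
  have hset : PySem.List.pySetD ns i (PySem.List.pyGetD ns i 0 + v) = ns.set j (ns.getD j 0 + v) := by
    simp [PySem.List.pySetD, PySem.List.pySet?, hj, hget]
  have hget' : PySem.List.pyGetD (ns.set j (ns.getD j 0 + v)) i 0 = ns.getD j 0 + v := by
    unfold PySem.List.pyGetD PySem.List.pyGet?
    rw [List.length_set, hj, Option.bind_some, List.getElem?_set_self hjn]
    rfl
  rw [hset, hget, hget', pvEvenSum_set ns j hjn (ns.getD j 0 + v)]
  split_ifs <;> ring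

lemma pvLoop (queries : List (List Int)) : ∀ (ns : List Int) (res : List Int),
    (∀ q ∈ queries, PySem.Raise.InRange ns.length (q.getD 1 0)) →
    (queries.foldl (fun (st : List Int × Int × List Int) q =>
      let ns := st.1
      let val := q.getD 0 0
      let index := q.getD 1 0
      let oldValWasEven := PySem.Int.mod (PySem.List.pyGetD ns index 0) 2 = 0
      let oldVal := PySem.List.pyGetD ns index 0
      let ns' := PySem.List.pySetD ns index (oldVal + val)
      let es1 := if oldValWasEven then st.2.1 - oldVal else st.2.1
      let newVal := PySem.List.pyGetD ns' index 0
      let es2 := if PySem.Int.mod newVal 2 = 0 then es1 + newVal else es1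
      (ns', es2, st.2.2 ++ [es2])) (ns, pvEvenSum ns, res)).2.2 =
    (queries.foldl (fun (st : List Int × List Int) q =>
      let val := q.getD 0 0
      let index := q.getD 1 0
      let ns' := PySem.List.pySetD st.1 index (PySem.List.pyGetD st.1 index 0 + val)
      (ns', st.2 ++ [((ns'.filter (fun num => PySem.Int.mod num 2 = 0)).sum)])) (ns, res)).2 := by
  induction queries with
  | nil => intro ns res _; rfl
  | cons q qs ih =>
    intro ns res hpre
    have hq := hpre q (List.mem_cons_self ..)
    obtain ⟨j, hj, hjn⟩ := pvIdx_norm ns.length (q.getD 1 0) hq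
    have hlen : (PySem.List.pySetD ns (q.getD 1 0) (PySem.List.pyGetD ns (q.getD 1 0) 0 + q.getD 0 0)).length = ns.length := by
      simp only [PySem.List.pySetD, PySem.List.pySet?, hj, Option.map_some, Option.getD_some, List.length_set]
    simp only [List.foldl]
    rw [pvStep ns (q.getD 1 0) (q.getD 0 0) hq]
    exact ih _ _ (fun p hp => by rw [hlen]; exact hpre p (List.mem_cons_of_mem _ hp))

-- ===== VERDICT (by name: the statement is the Claim_ definition above) =====
theorem sumEvenAfterQueries_spec : Claim_equal_sumEvenAfterQueries := by
  intro nums queries _ hpre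
  unfold Spec_sumEvenAfterQueries sumEvenAfterQueries sumEvenAfterQueries_alt
  rw [pvEvenSum_foldl nums 0, zero_add]
  exact pvLoop queries nums [] (fun q hq => (hpre q hq).2)
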